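-- pv_equiv track=rewrite | github.com/beatrizmontenegro07/projeto-linguagens-formais | minimizador.py | primeiroPasso
-- ===== SOURCE A (Python) =====
-- def primeiroPasso(estados, dic_indices):
--     table = {}
--
--     for linha in estados:
--         lista = []
--         for coluna in estados:
--             if dic_indices[linha] > dic_indices[coluna]:
--                 lista.append(0)
--
--         if lista:
--             table[linha] = lista
--
--     return table
-- ===== SOURCE B (Python) =====
-- def primeiroPasso(estados, dic_indices):
--     # sort all index values once, then rank each row by binary search
--     vals = sorted(dic_indices[s] for s in estados)
--     table = {}
--     for linha in estados:
--         v = dic_indices[linha]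
--         lo, hi = 0, len(vals)
--         while lo < hi:
--             mid = (lo + hi) // 2
--             if vals[mid] < v:
--                 lo = mid + 1
--             else:
--                 hi = mid
--         if lo:
--             table[linha] = [0] * lo
--     return table
-- ===== Notes on version B (the rewrite author's own statement) =====
-- stated objective: alternative
-- what changed: Replaces the O(n^2) nested scan (for each row, scan all columns counting strictly smaller indices) by sorting the index values once and ranking each row with a hand-written binary search (bisect_left), so the inner scan disappears.
import Mathlib
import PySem

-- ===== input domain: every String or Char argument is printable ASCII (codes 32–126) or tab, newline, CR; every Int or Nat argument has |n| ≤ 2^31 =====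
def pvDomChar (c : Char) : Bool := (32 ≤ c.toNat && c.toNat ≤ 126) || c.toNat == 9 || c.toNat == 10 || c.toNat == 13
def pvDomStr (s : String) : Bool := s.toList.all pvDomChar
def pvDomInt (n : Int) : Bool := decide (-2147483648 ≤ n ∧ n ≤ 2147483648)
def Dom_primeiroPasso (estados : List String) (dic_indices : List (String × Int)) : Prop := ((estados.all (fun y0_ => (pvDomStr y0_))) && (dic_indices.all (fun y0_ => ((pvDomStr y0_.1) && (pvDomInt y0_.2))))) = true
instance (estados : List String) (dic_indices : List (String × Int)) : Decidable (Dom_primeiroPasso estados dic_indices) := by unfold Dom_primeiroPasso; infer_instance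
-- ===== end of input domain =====

-- B sorts the index values once and ranks each row by a hand-written binary search
-- (bisect_left), replacing A's nested column scan; return-value equivalence on Pre_.

-- dic_indices[s] (first match of the association list); defaults to 0, but Pre_
-- guarantees the key is present (Python raises KeyError otherwise)
def pvLookup (dic_indices : List (String × Int)) (s : String) : Int :=
  ((PySem.Dict.mk dic_indices).get? s).getD 0

-- ===== PORT A =====
def primeiroPasso (estados : List String) (dic_indices : List (String × Int)) : List (String × List Int) :=
  (estados.foldl (fun table linha =>
      let lista := estados.foldl (fun lista coluna =>
          if pvLookup dic_indices linha > pvLookup dic_indices coluna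
          then lista ++ [(0 : Int)] else lista) []
      if lista ≠ [] then table.insert linha lista else table)
    (PySem.Dict.empty : PySem.Dict String (List Int))).items

-- ===== PORT B =====
-- the while-loop of Source B: lo, hi shrink until lo = hi (bisect_left); the fuel
-- argument (≥ hi - lo, halved each step) only makes the recursion structural
def pvBisectGo (vals : List Int) (v : Int) : Nat → Nat → Nat → Nat
  | 0, lo, _ => lo
  | fuel + 1, lo, hi =>
    if lo < hi then
      let mid := (lo + hi) / 2
      if vals.getD mid 0 < v then pvBisectGo vals v fuel (mid + 1) hi
      else pvBisectGo vals v fuel lo mid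
    else lo

def primeiroPasso_alt (estados : List String) (dic_indices : List (String × Int)) : List (String × List Int) :=
  let vals := PySem.List.sorted (estados.map (pvLookup dic_indices)) (fun x => x)
  (estados.foldl (fun table linha =>
      let v := pvLookup dic_indices linha
      let lo := pvBisectGo vals v vals.length 0 vals.length
      if lo ≠ 0 then table.insert linha (List.replicate lo (0 : Int)) else table)
    (PySem.Dict.empty : PySem.Dict String (List Int))).items

-- ===== PRECONDITION & SPEC =====
-- Pre_ excludes exactly the inputs where Python A raises KeyError: some state of
-- estados is not a key of dic_indices.
def Pre_primeiroPasso (estados : List String) (dic_indices : List (String × Int)) : Prop :=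
  ∀ s ∈ estados, s ∈ dic_indices.map Prod.fst
instance (estados : List String) (dic_indices : List (String × Int)) : Decidable (Pre_primeiroPasso estados dic_indices) := by unfold Pre_primeiroPasso; infer_instance

def pvWitness_primeiroPasso : List String × (List (String × Int)) :=
  (["a", "b", "a", "c"], [("a", 2), ("b", 0), ("c", 2)])

def Spec_primeiroPasso (estados : List String) (dic_indices : List (String × Int)) (out : List (String × List Int)) : Prop := out = primeiroPasso_alt estados dic_indices
instance (estados : List String) (dic_indices : List (String × Int)) (out : List (String × List Int)) : Decidable (Spec_primeiroPasso estados dic_indices out) := by unfold Spec_primeiroPasso; infer_instance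

-- ===== CLAIM (what is proved, stated in full; the proofs are below) =====
def Claim_equal_primeiroPasso : Prop := ∀ (estados : List String) (dic_indices : List (String × Int)), Dom_primeiroPasso estados dic_indices → Pre_primeiroPasso estados dic_indices → Spec_primeiroPasso estados dic_indices (primeiroPasso estados dic_indices)

-- ===== LEMMAS AND PROOFS =====

-- In a ≤-sorted list, position i holds a value < v iff i is below the count of values < v.
theorem pv_sorted_lt_iff (v : Int) :
    ∀ (l : List Int), l.Pairwise (· ≤ ·) →
      ∀ i (hi : i < l.length), (l[i] < v ↔ i < l.countP (· < v)) := by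
  intro l hp
  induction l with
  | nil => intro i hi; simp at hi
  | cons a t ih =>
    rcases List.pairwise_cons.mp hp with ⟨ha, hpt⟩
    intro i hi
    by_cases hav : a < v
    · have hc : (a :: t).countP (· < v) = t.countP (· < v) + 1 := by
        simp [hav]
      cases i with
      | zero => simp [hav, hc]
      | succ j =>
        have hj : j < t.length := by simpa using hi
        have := ih hpt j hj
        simpa [hc, Nat.succ_lt_succ_iff] using this
    · have hct : t.countP (· < v) = 0 := by
        rw [List.countP_eq_zero]
        intro b hb
        have : a ≤ b := ha b hb
        simp only [decide_eq_true_eq]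
        omega
      have hc : (a :: t).countP (· < v) = 0 := by
        simp [hav, hct]
      cases i with
      | zero => simp [hav, hc]
      | succ j =>
        have hj : j < t.length := by simpa using hi
        have hb : t[j] ∈ t := List.getElem_mem hj
        have hat : a ≤ t[j] := ha _ hb
        simp only [hc, List.getElem_cons_succ]
        constructor
        · intro h; omega
        · intro h; omega

-- The binary search computes the number of values < v, given a ≤-sorted list and
-- a bracketing invariant lo ≤ count ≤ hi ≤ len.
theorem pv_bisectGo_eq (l : List Int) (v : Int) (hp : l.Pairwise (· ≤ ·)) :
    ∀ (n lo hi : Nat), hi - lo ≤ n →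
      lo ≤ l.countP (· < v) → l.countP (· < v) ≤ hi → hi ≤ l.length →
      pvBisectGo l v n lo hi = l.countP (· < v) := by
  intro n
  induction n with
  | zero =>
    intro lo hi h1 h2 h3 h4
    simp only [pvBisectGo]
    omega
  | succ m ih =>
    intro lo hi h1 h2 h3 h4
    rw [pvBisectGo]
    by_cases hlt : lo < hi
    · simp only [hlt, if_true]
      have hmidlt : (lo + hi) / 2 < l.length := by omega
      have hget : l.getD ((lo + hi) / 2) 0 = l[(lo + hi) / 2] := List.getD_eq_getElem l 0 hmidlt
      have hiff := pv_sorted_lt_iff v l hp ((lo + hi) / 2) hmidlt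
      by_cases hm : l.getD ((lo + hi) / 2) 0 < v
      · simp only [hm, if_true]
        have : (lo + hi) / 2 < l.countP (· < v) := hiff.mp (by rw [← hget]; exact hm)
        exact ih ((lo + hi) / 2 + 1) hi (by omega) (by omega) h3 h4
      · simp only [hm, if_false]
        have : ¬ (lo + hi) / 2 < l.countP (· < v) := by
          intro hcl
          exact hm (by rw [hget]; exact hiff.mpr hcl)
        exact ih lo ((lo + hi) / 2) (by omega) h2 (by omega) (by omega)
    · simp only [hlt, if_false]
      omega

-- A's inner column scan yields count-of-smaller many zeros.
theorem pv_inner_eq (estados : List String) (dic_indices : List (String × Int)) (linha : String) :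
    estados.foldl (fun lista coluna =>
        if pvLookup dic_indices linha > pvLookup dic_indices coluna
        then lista ++ [(0 : Int)] else lista) []
      = List.replicate (estados.countP
          (fun c => pvLookup dic_indices c < pvLookup dic_indices linha)) (0 : Int) := by
  have h := PySem.List.foldl_append_if
      (fun c => decide (pvLookup dic_indices linha > pvLookup dic_indices c))
      (fun _ => (0 : Int)) estados []
  simp only [decide_eq_true_eq] at h
  rw [h]
  simp only [List.nil_append, List.map_const', ← List.countP_eq_length_filter]

-- B's rank equals A's count for every row.
theorem pv_rank_eq (estados : List String) (dic_indices : List (String × Int)) (linha : String) :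
    pvBisectGo (PySem.List.sorted (estados.map (pvLookup dic_indices)) (fun x => x))
        (pvLookup dic_indices linha)
        (PySem.List.sorted (estados.map (pvLookup dic_indices)) (fun x => x)).length 0
        (PySem.List.sorted (estados.map (pvLookup dic_indices)) (fun x => x)).length
      = estados.countP (fun c => pvLookup dic_indices c < pvLookup dic_indices linha) := by
  set vals := PySem.List.sorted (estados.map (pvLookup dic_indices)) (fun x => x) with hv
  set v := pvLookup dic_indices linha
  have hp : vals.Pairwise (· ≤ ·) := by
    simpa using PySem.List.sorted_pairwise (estados.map (pvLookup dic_indices)) (fun x => x)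
  have hperm : vals.Perm (estados.map (pvLookup dic_indices)) :=
    PySem.List.sorted_perm _ _ _
  have hcount : vals.countP (· < v) =
      estados.countP (fun c => pvLookup dic_indices c < v) := by
    rw [hperm.countP_eq, List.countP_map]
    rfl
  rw [pv_bisectGo_eq vals v hp vals.length 0 vals.length (by omega) (by omega)
    (by rw [hcount]; exact le_of_le_of_eq List.countP_le_length
          (by rw [hperm.length_eq, List.length_map]))
    (le_refl _), hcount]

theorem pv_ports_eq (estados : List String) (dic_indices : List (String × Int)) :
    primeiroPasso estados dic_indices = primeiroPasso_alt estados dic_indices := by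
  unfold primeiroPasso primeiroPasso_alt
  congr 1
  apply PySem.List.foldl_congr_mem  -- pointwise equality of the two step functions
  intro table linha _
  simp only
  rw [pv_inner_eq, pv_rank_eq]
  set c := estados.countP (fun c => pvLookup dic_indices c < pvLookup dic_indices linha)
  by_cases hc : c = 0
  · simp [hc]
  · simp [hc, List.replicate_eq_nil_iff]

-- ===== VERDICT (by name: the statement is the Claim_ definition above) =====
theorem primeiroPasso_spec : Claim_equal_primeiroPasso := by
  intro estados dic_indices _ _
  unfold Spec_primeiroPasso
  exact pv_ports_eq estados dic_indices
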